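-- pv_equiv track=rewrite | github.com/Javitronxo/AdventOfCode | 2020/day_13.py | find_bus_cadence
-- ===== SOURCE A (Python) =====
-- from typing import Tuple
--
-- def find_bus_cadence(bus: int, cadence: int, start_time: int, offset: int) -> Tuple[int, int]:
--     timestamp = start_time
--     while (timestamp - offset) % bus != 0:
--         timestamp += cadence
--     new_cadence = timestamp + cadence
--     while (new_cadence - offset) % bus != 0:
--         new_cadence += cadence
--     return timestamp, new_cadence - timestamp
-- ===== SOURCE B (Python) =====
-- from math import gcd
-- from typing import Tuple
--
-- def find_bus_cadence(bus: int, cadence: int, start_time: int, offset: int) -> Tuple[int, int]: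
--     b = abs(bus)
--     g = gcd(b, cadence)
--     n = b // g
--     d = (offset - start_time) % b
--     k = (d // g) * pow(cadence // g, -1, n) % n
--     return start_time + k * cadence, n * cadence
-- ===== Notes on version B (the rewrite author's own statement) =====
-- stated objective: faster
-- what changed: Both linear-search while loops are replaced by a closed-form solution of the linear congruence k*cadence = offset-start_time (mod bus) using math.gcd and a modular inverse (pow(x,-1,n)); the period is returned directly as (|bus|/gcd)*cadence.
import Mathlib
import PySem

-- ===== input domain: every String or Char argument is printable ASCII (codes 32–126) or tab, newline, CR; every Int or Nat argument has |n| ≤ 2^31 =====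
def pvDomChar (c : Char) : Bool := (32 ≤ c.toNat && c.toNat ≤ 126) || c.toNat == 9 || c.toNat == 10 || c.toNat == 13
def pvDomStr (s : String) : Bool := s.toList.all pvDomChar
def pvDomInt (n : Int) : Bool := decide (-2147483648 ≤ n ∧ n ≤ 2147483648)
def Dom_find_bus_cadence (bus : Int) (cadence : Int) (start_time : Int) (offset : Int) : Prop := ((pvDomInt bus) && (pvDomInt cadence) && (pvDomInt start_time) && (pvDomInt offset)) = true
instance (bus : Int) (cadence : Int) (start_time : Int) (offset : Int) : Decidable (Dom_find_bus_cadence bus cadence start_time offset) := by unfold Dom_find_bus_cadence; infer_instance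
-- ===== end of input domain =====

-- B replaces A's two linear-search while loops by a closed-form gcd/modular-inverse solution of the congruence (asymptotically faster).


-- ===== PORT A =====
-- 'while (t - offset) % bus != 0: t += cadence', fuel-bounded to stay total:
-- inside Pre_ each loop exits within |bus| steps, so the fuel |bus|+1 is never exhausted there.
def pvLoopA (bus : Int) (cadence : Int) (offset : Int) : Nat → Int → Int
  | 0, t => t
  | f + 1, t =>
      if PySem.Int.mod (t - offset) bus ≠ 0 then pvLoopA bus cadence offset f (t + cadence)
      else t

def find_bus_cadence (bus : Int) (cadence : Int) (start_time : Int) (offset : Int) : Int × Int :=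
  let fuel := bus.natAbs + 1
  let timestamp := pvLoopA bus cadence offset fuel start_time
  let new_cadence := pvLoopA bus cadence offset fuel (timestamp + cadence)
  (timestamp, new_cadence - timestamp)

-- ===== PORT B =====
-- pow(x, -1, n) is ported as Mathlib's Bézout coefficient Int.gcdA reduced mod n: the unique
-- inverse in [0, n), i.e. exactly the Python value wherever the Python pow returns (gcd(x,n)=1, n>0).
def find_bus_cadence_alt (bus : Int) (cadence : Int) (start_time : Int) (offset : Int) : Int × Int :=
  let b : Int := |bus|
  let g : Int := Int.gcd b cadence
  let n : Int := PySem.Int.floordiv b g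
  let d : Int := PySem.Int.mod (offset - start_time) b
  let inv : Int := PySem.Int.mod (Int.gcdA (PySem.Int.floordiv cadence g) n) n
  let k : Int := PySem.Int.mod (PySem.Int.floordiv d g * inv) n
  (start_time + k * cadence, n * cadence)

-- ===== PRECONDITION & SPEC =====
-- A raises ZeroDivisionError when bus = 0 and loops forever when gcd(bus, cadence) does not
-- divide start_time - offset; Pre_ excludes exactly those inputs (A returns on all others).
def Pre_find_bus_cadence (bus : Int) (cadence : Int) (start_time : Int) (offset : Int) : Prop :=
  bus ≠ 0 ∧ (Int.gcd bus cadence : Int) ∣ (start_time - offset)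
instance (bus : Int) (cadence : Int) (start_time : Int) (offset : Int) : Decidable (Pre_find_bus_cadence bus cadence start_time offset) := by unfold Pre_find_bus_cadence; infer_instance

def pvWitness_find_bus_cadence : Int × Int × Int × Int := (7, 3, 1, 0)

def Spec_find_bus_cadence (bus : Int) (cadence : Int) (start_time : Int) (offset : Int) (out : Int × Int) : Prop := out = find_bus_cadence_alt bus cadence start_time offset
instance (bus : Int) (cadence : Int) (start_time : Int) (offset : Int) (out : Int × Int) : Decidable (Spec_find_bus_cadence bus cadence start_time offset out) := by unfold Spec_find_bus_cadence; infer_instance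

-- ===== CLAIM (what is proved, stated in full; the proofs are below) =====
def Claim_equal_find_bus_cadence : Prop := ∀ (bus : Int) (cadence : Int) (start_time : Int) (offset : Int), Dom_find_bus_cadence bus cadence start_time offset → Pre_find_bus_cadence bus cadence start_time offset → Spec_find_bus_cadence bus cadence start_time offset (find_bus_cadence bus cadence start_time offset)

-- ===== LEMMAS AND PROOFS =====

-- The fuel-bounded loop stops at the FIRST j with bus ∣ (t + j*cadence - offset), provided j is within the fuel.
lemma pvLoopA_spec (bus cadence offset : Int) (fuel : Nat) (t : Int) (j : Nat)
    (hfj : j < fuel)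
    (hj : bus ∣ (t + (j : Int) * cadence - offset))
    (hmin : ∀ i : Nat, i < j → ¬ bus ∣ (t + (i : Int) * cadence - offset)) :
    pvLoopA bus cadence offset fuel t = t + (j : Int) * cadence := by
  induction fuel generalizing t j with
  | zero => omega
  | succ f ih =>
    by_cases h0 : bus ∣ (t - offset)
    · have hj0 : j = 0 := by
        by_contra h
        exact hmin 0 (by omega) (by simpa using h0)
      subst hj0
      simp [pvLoopA, PySem.Int.mod_eq_zero_iff_dvd, h0]
    · have hjpos : j ≠ 0 := by
        rintro rfl
        exact h0 (by simpa using hj)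
      obtain ⟨j', rfl⟩ : ∃ j', j = j' + 1 := ⟨j - 1, by omega⟩
      have hstep : pvLoopA bus cadence offset (f + 1) t = pvLoopA bus cadence offset f (t + cadence) := by
        simp [pvLoopA, PySem.Int.mod_eq_zero_iff_dvd, h0]
      rw [hstep]
      have hrec := ih (t + cadence) j' (by omega)
        (by
          have : t + cadence + (j' : Int) * cadence - offset = t + ((j' : Nat) + 1 : Int) * cadence - offset := by
            ring
          rw [this]; exact_mod_cast hj)
        (by
          intro i hi hdvd
          apply hmin (i + 1) (by omega)
          have : t + ((i : Nat) + 1 : Int) * cadence - offset = t + cadence + (i : Int) * cadence - offset := by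
            ring
          rw [show ((i + 1 : Nat) : Int) = ((i : Nat) + 1 : Int) by push_cast; ring, this]
          exact hdvd)
      rw [hrec]; push_cast; ring

-- ===== VERDICT (by name: the statement is the Claim_ definition above) =====
theorem find_bus_cadence_spec : Claim_equal_find_bus_cadence := by
  intro bus cadence start offset _ hpre
  obtain ⟨hb, hgd⟩ := hpre
  unfold Spec_find_bus_cadence
  set b : Int := |bus| with hbdef
  have hb0 : 0 < b := abs_pos.mpr hb
  set G : Int := (Int.gcd b cadence : Int) with hGdef
  have hGgcd : Int.gcd b cadence = Int.gcd bus cadence := by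
    simp [hbdef, Int.gcd, Int.natAbs_abs]
  have hG0 : 0 < G := by
    have h1 : Int.gcd bus cadence ≠ 0 := fun h => hb (Int.gcd_eq_zero_iff.mp h).1
    rw [hGdef, hGgcd]
    exact_mod_cast Nat.pos_of_ne_zero h1
  have hGb : G ∣ b := by rw [hGdef]; exact Int.gcd_dvd_left _ _
  have hGc : G ∣ cadence := by rw [hGdef]; exact Int.gcd_dvd_right _ _
  set n : Int := b / G with hndef
  have hbn : G * n = b := Int.mul_ediv_cancel' hGb
  have hn0 : 0 < n := by nlinarith
  set c' : Int := cadence / G with hc'def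
  have hcc : G * c' = cadence := Int.mul_ediv_cancel' hGc
  set d : Int := (offset - start) % b with hddef
  have hd0 : 0 ≤ d := Int.emod_nonneg _ (by omega)
  have hdb : d < b := Int.emod_lt_of_pos _ hb0
  have hGos : G ∣ (offset - start) := by
    have h1 : G ∣ (start - offset) := by rw [hGdef, hGgcd]; exact_mod_cast hgd
    have h2 := h1.neg_right
    rwa [neg_sub] at h2
  have hGd : G ∣ d := by
    have hdef : d = (offset - start) - b * ((offset - start) / b) := Int.emod_def _ _
    rw [hdef]
    exact dvd_sub hGos (hGb.mul_right _)
  set d' : Int := d / G with hd'def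
  have hdd : G * d' = d := Int.mul_ediv_cancel' hGd
  have hco : Int.gcd c' n = 1 := by
    have hcomm : Int.gcd cadence b = Int.gcd b cadence := Int.gcd_comm _ _
    have hG0' : 0 < (Int.gcd b cadence : Int) := hGdef ▸ hG0
    have hpos : 0 < Int.gcd cadence b := by rw [hcomm]; exact_mod_cast hG0'
    have h := Int.gcd_div_gcd_div_gcd hpos
    rw [hcomm] at h
    rw [hc'def, hndef, hGdef]
    exact h
  set a : Int := Int.gcdA c' n with hadef
  have hinv : c' * a - 1 = n * (-(Int.gcdB c' n)) := by
    have h := Int.gcd_eq_gcd_ab c' n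
    rw [hco] at h
    push_cast at h
    linarith [h]
  set k : Int := (d' * (a % n)) % n with hkdef
  have hk0 : 0 ≤ k := Int.emod_nonneg _ (by omega)
  have hkn : k < n := Int.emod_lt_of_pos _ hn0
  have hkc : n ∣ (k * c' - d') := by
    refine ⟨d' * (-(Int.gcdB c' n)) - d' * (a / n) * c' - ((d' * (a % n)) / n) * c', ?_⟩
    have ha : a % n = a - n * (a / n) := Int.emod_def _ _
    have hk : k = d' * (a % n) - n * ((d' * (a % n)) / n) := Int.emod_def _ _
    calc k * c' - d'
        = (d' * (a % n) - n * ((d' * (a % n)) / n)) * c' - d' := by rw [← hk]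
      _ = (d' * (a - n * (a / n)) - n * ((d' * (a % n)) / n)) * c' - d' := by rw [← ha]
      _ = d' * (c' * a - 1) - n * (d' * (a / n) * c' + ((d' * (a % n)) / n) * c') := by ring
      _ = d' * (n * (-(Int.gcdB c' n))) - n * (d' * (a / n) * c' + ((d' * (a % n)) / n) * c') := by rw [hinv]
      _ = n * (d' * (-(Int.gcdB c' n)) - d' * (a / n) * c' - ((d' * (a % n)) / n) * c') := by ring
  have hbd : b ∣ (start - offset + d) := by
    have hdef : d = (offset - start) - b * ((offset - start) / b) := Int.emod_def _ _
    exact ⟨-((offset - start) / b), by linear_combination hdef⟩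
  have habs : (bus.natAbs : Int) = b := (Int.abs_eq_natAbs bus).symm
  -- the loop predicate, characterized by the closed form
  have char : ∀ j : Int, bus ∣ (start + j * cadence - offset) ↔ n ∣ (j - k) := by
    intro j
    rw [← Int.natAbs_dvd, habs]
    have hcop : IsCoprime n c' := by
      rw [Int.isCoprime_iff_gcd_eq_one, Int.gcd_comm]; exact hco
    constructor
    · intro h
      have h1 : b ∣ (j * cadence - d) := by
        have h2 := dvd_sub h hbd
        rwa [show start + j * cadence - offset - (start - offset + d) = j * cadence - d by ring] at h2
      have h2 : n ∣ (j * c' - d') := by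
        have h3 : G * n ∣ G * (j * c' - d') := by
          rw [show G * (j * c' - d') = j * (G * c') - G * d' by ring, hcc, hdd, hbn]
          exact h1
        exact (mul_dvd_mul_iff_left hG0.ne').mp h3
      have h3 : n ∣ (j - k) * c' := by
        have h4 := dvd_sub h2 hkc
        rwa [show j * c' - d' - (k * c' - d') = (j - k) * c' by ring] at h4
      exact hcop.dvd_of_dvd_mul_right h3
    · intro h
      have h2 : n ∣ (j * c' - d') := by
        have h3 := dvd_add (h.mul_right c') hkc
        rwa [show (j - k) * c' + (k * c' - d') = j * c' - d' by ring] at h3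
      have h1 : b ∣ (j * cadence - d) := by
        have h3 := mul_dvd_mul_left G h2
        rwa [show G * (j * c' - d') = j * (G * c') - G * d' by ring, hcc, hdd, hbn] at h3
      have h4 := dvd_add h1 hbd
      rwa [show j * cadence - d + (start - offset + d) = start + j * cadence - offset by ring] at h4
  have hnb : n ≤ b := by nlinarith
  -- first loop
  set fuel : Nat := bus.natAbs + 1 with hfueldef
  have hkNat : ((k.toNat : Nat) : Int) = k := Int.toNat_of_nonneg hk0
  have h1 : pvLoopA bus cadence offset fuel start = start + k * cadence := by
    have hfj : k.toNat < fuel := by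
      rw [hfueldef]
      have : k < (bus.natAbs : Int) + 1 := by rw [habs]; omega
      omega
    have hmain := pvLoopA_spec bus cadence offset fuel start k.toNat hfj
      (by rw [hkNat]; exact (char k).mpr (by simp))
      (by
        intro i hi hdvd
        have h5 : n ∣ ((i : Int) - k) := (char i).mp hdvd
        have h6 : n ∣ (k - (i : Int)) := by
          have := h5.neg_right; rwa [neg_sub] at this
        have hilt : (i : Int) < k := by omega
        have := Int.le_of_dvd (by omega) h6
        omega)
    rw [hkNat] at hmain
    exact hmain
  -- second loop, started at timestamp + cadence
  set t : Int := start + k * cadence with htdef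
  have hnNat : (((n.toNat - 1 : Nat)) : Int) = n - 1 := by omega
  have h2 : pvLoopA bus cadence offset fuel (t + cadence) = t + n * cadence := by
    have hfj : (n.toNat - 1 : Nat) < fuel := by
      rw [hfueldef]
      have : n ≤ (bus.natAbs : Int) := by rw [habs]; omega
      omega
    have hmain := pvLoopA_spec bus cadence offset fuel (t + cadence) (n.toNat - 1) hfj
      (by
        rw [hnNat]
        have : t + cadence + (n - 1) * cadence - offset = start + (k + n) * cadence - offset := by
          rw [htdef]; ring
        rw [this]
        exact (char (k + n)).mpr (by simp)
      )
      (by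
        intro i hi hdvd
        have hieq : t + cadence + (i : Int) * cadence - offset = start + (k + 1 + (i : Int)) * cadence - offset := by
          rw [htdef]; ring
        rw [hieq] at hdvd
        have h5 : n ∣ (k + 1 + (i : Int) - k) := (char (k + 1 + (i : Int))).mp hdvd
        rw [show k + 1 + (i : Int) - k = 1 + (i : Int) by ring] at h5
        have hlt : (i : Int) < n - 1 := by omega
        have := Int.le_of_dvd (by omega) h5
        omega)
    rw [hnNat] at hmain
    rw [hmain, htdef]; ring
  -- assemble both sides
  have halt : find_bus_cadence_alt bus cadence start offset = (t, n * cadence) := by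
    have e_b : PySem.Int.floordiv b G = n := by
      rw [PySem.Int.floordiv_eq_ediv_of_pos hG0]
    have e_c : PySem.Int.floordiv cadence G = c' := by
      rw [PySem.Int.floordiv_eq_ediv_of_pos hG0]
    have e_d0 : PySem.Int.mod (offset - start) b = d := by
      rw [PySem.Int.mod_eq_emod_of_pos hb0]
    have e_d : PySem.Int.floordiv d G = d' := by
      rw [PySem.Int.floordiv_eq_ediv_of_pos hG0]
    have e_inv : PySem.Int.mod (Int.gcdA c' n) n = a % n := by
      rw [PySem.Int.mod_eq_emod_of_pos hn0]
    have e_k : PySem.Int.mod (d' * (a % n)) n = k := by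
      rw [PySem.Int.mod_eq_emod_of_pos hn0]
    simp only [find_bus_cadence_alt]
    rw [← hbdef, ← hGdef, e_d0, e_c, e_b, e_d, e_inv, e_k, htdef]
  rw [halt]
  simp only [find_bus_cadence]
  rw [← hfueldef, h1, h2]
  simp
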